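-- pv_equiv track=rewrite | github.com/akashi-org/akashi | akashi_core/pysl/_gl_vec_gen.py | _gen_prop
-- ===== SOURCE A (Python) =====
-- import itertools
--
-- def _indent(lines: list[str], pad: int = 4) -> list[str]:
--     return [' ' * pad + l for l in lines]
--
-- def _nodup_letters(letter: str) -> list[str]:
--
--     res = []
--     for i in range(1, len(letter) + 1):
--         res += [''.join(l) for l in itertools.permutations(letter, i)]
--     return res
--
-- def _odup_letters(letter: str, ndps: list[str]) -> list[str]:
--
--     res = []
--     for i in range(1, 4 + 1):
--         res += [''.join(l) for l in itertools.product(letter, repeat=i) if ''.join(l) not in ndps]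
--     return res
--
-- def _gen_prop(dim: int) -> list[str]:
--
--     headers = [
--         '@dataclass',
--         f'class _{dim}d_prop(tp.Generic[_TItem]):',
--         ''
--     ]
--
--     bodies = []
--
--     for lsets in ['xyzw', 'rgba', 'stpq']:
--         ndps = _nodup_letters(lsets[0:dim])
--         for ndp in ndps:
--             tp = f'gvec{len(ndp)}[_TItem]' if len(ndp) > 1 else '_TItem'
--             bodies += [
--                 '@property',
--                 f'def {ndp}(self) -> {tp}: ...',
--                 f'@{ndp}.setter',
--                 f'def {ndp}(self, value: {tp}): ...'
--             ]
--         for odp in _odup_letters(lsets[0:dim], ndps):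
--             tp = f'gvec{len(odp)}[_TItem]' if len(odp) > 1 else '_TItem'
--             bodies += [
--                 '@property',
--                 f'def {odp}(self) -> {tp}: ...'
--             ]
--
--     return headers + _indent(bodies)
-- ===== SOURCE B (Python) =====
-- import itertools
--
-- def _gen_prop(dim: int) -> list[str]:
--     out = [
--         '@dataclass',
--         f'class _{dim}d_prop(tp.Generic[_TItem]):',
--         ''
--     ]
--     for lsets in ['xyzw', 'rgba', 'stpq']:
--         prefix = lsets[0:dim]
--         nodup, dup = [], []
--         for i in range(1, 4 + 1):
--             for t in itertools.product(prefix, repeat=i):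
--                 name = ''.join(t)
--                 tp = f'gvec{i}[_TItem]' if i > 1 else '_TItem'
--                 if len(set(t)) == i:
--                     nodup += [
--                         '@property',
--                         f'def {name}(self) -> {tp}: ...',
--                         f'@{name}.setter',
--                         f'def {name}(self, value: {tp}): ...'
--                     ]
--                 else:
--                     dup += [
--                         '@property',
--                         f'def {name}(self) -> {tp}: ...'
--                     ]
--         out += [' ' * 4 + l for l in nodup + dup]
--     return out
-- ===== Notes on version B (the rewrite author's own statement) =====
-- stated objective: simpler
-- what changed: B replaces A's two separate enumerations (a permutations-based pass for distinct swizzles plus a product-based pass with a 'not in ndps' list scan) by one pass over itertools.product per length 1..4, classifying each tuple by letter-distinctness into a nodup and a dup buffer emitted in order.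
import Mathlib
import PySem

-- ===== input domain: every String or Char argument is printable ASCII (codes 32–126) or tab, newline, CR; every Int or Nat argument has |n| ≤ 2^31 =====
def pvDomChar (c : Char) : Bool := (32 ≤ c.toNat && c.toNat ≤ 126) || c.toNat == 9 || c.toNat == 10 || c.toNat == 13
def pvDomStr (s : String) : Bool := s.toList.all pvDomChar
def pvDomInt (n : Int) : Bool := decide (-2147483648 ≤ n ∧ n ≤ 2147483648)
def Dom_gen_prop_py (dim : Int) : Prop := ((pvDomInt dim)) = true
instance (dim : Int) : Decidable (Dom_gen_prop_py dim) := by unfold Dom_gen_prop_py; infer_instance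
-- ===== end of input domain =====

-- B merges A's two enumerations (permutations-based nodup pass + product-based `not in ndps` pass)
-- into ONE pass over itertools.product per length, classifying each tuple by letter-distinctness
-- into two buffers (objective: simpler — no permutations helper, no `not in ndps` list scan).

-- shared formatting helpers (the f-strings both Pythons build, on the char-list side;
-- exact: String.ofList of concatenated ASCII char lists is Python string formatting)
def pvTp (n : Nat) : List Char :=
  if n > 1 then "gvec".toList ++ PySem.Int.toChars (n : Int) ++ "[_TItem]".toList
  else "_TItem".toList

def pvPropLines (name tp : List Char) : List String :=
  ["@property",
   String.ofList ("def ".toList ++ name ++ "(self) -> ".toList ++ tp ++ ": ...".toList)]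

def pvSetterLines (name tp : List Char) : List String :=
  [String.ofList ("@".toList ++ name ++ ".setter".toList),
   String.ofList ("def ".toList ++ name ++ "(self, value: ".toList ++ tp ++ "): ...".toList)]

def pvHeaders (dim : Int) : List String :=
  ["@dataclass",
   String.ofList ("class _".toList ++ PySem.Int.toChars dim ++ "d_prop(tp.Generic[_TItem]):".toList),
   ""]

-- itertools.product(s, repeat=i), hand-ported (PySem has no repeated product);
-- exact: first coordinate varies slowest, as in Python
def pvProduct (s : List Char) : Nat → List (List Char)
  | 0 => [[]]
  | n + 1 => s.flatMap (fun c => (pvProduct s n).map (fun t => c :: t))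

-- ===== PORT A =====
def pvIndent (lines : List String) (pad : Nat) : List String :=
  lines.map (fun l => String.ofList (List.replicate pad ' ' ++ l.toList))

def pvNodupLetters (letter : List Char) : List (List Char) :=
  (PySem.List.pyRange 1 (PySem.List.len letter + 1) 1).foldl
    (fun res i => res ++ PySem.List.permutations letter i.toNat) []

def pvOdupLetters (letter : List Char) (ndps : List (List Char)) : List (List Char) :=
  (PySem.List.pyRange 1 (4 + 1) 1).foldl
    (fun res i => res ++ (pvProduct letter i.toNat).filter (fun t => !(ndps.contains t))) []

-- the body of A's `for lsets in …` loop, appending to the running `bodies`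
def pvBodyA (bodies : List String) (letters : List Char) : List String :=
  let ndps := pvNodupLetters letters
  let bodies := ndps.foldl (fun bodies ndp =>
    let tp := pvTp ndp.length
    bodies ++ pvPropLines ndp tp ++ pvSetterLines ndp tp) bodies
  (pvOdupLetters letters ndps).foldl (fun bodies odp =>
    bodies ++ pvPropLines odp (pvTp odp.length)) bodies

def gen_prop_py (dim : Int) : List String :=
  let bodies := ["xyzw", "rgba", "stpq"].foldl (fun bodies lsets =>
    pvBodyA bodies (PySem.Str.slice lsets (some 0) (some dim)).toList) []
  pvHeaders dim ++ pvIndent bodies 4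

-- ===== PORT B =====
-- B's single pass: the (nodup buffer, dup buffer) pair built over i = 1..4
def pvBufsB (pfx : List Char) : List String × List String :=
  (PySem.List.pyRange 1 (4 + 1) 1).foldl
    (fun (bufs : List String × List String) i =>
      (pvProduct pfx i.toNat).foldl (fun (bufs : List String × List String) t =>
        let tp := pvTp i.toNat
        if PySem.Set.len (PySem.Set.ofList t) == i then
          (bufs.1 ++ pvPropLines t tp ++ pvSetterLines t tp, bufs.2)
        else
          (bufs.1, bufs.2 ++ pvPropLines t tp)) bufs) ([], [])

def gen_prop_py_alt (dim : Int) : List String :=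
  ["xyzw", "rgba", "stpq"].foldl (fun out lsets =>
    let pfx := (PySem.Str.slice lsets (some 0) (some dim)).toList
    let bufs := pvBufsB pfx
    out ++ (bufs.1 ++ bufs.2).map (fun l => String.ofList (List.replicate 4 ' ' ++ l.toList)))
    (pvHeaders dim)

-- ===== PRECONDITION & SPEC =====
def Spec_gen_prop_py (dim : Int) (out : List String) : Prop := out = gen_prop_py_alt dim
instance (dim : Int) (out : List String) : Decidable (Spec_gen_prop_py dim out) := by unfold Spec_gen_prop_py; infer_instance

-- ===== CLAIM (what is proved, stated in full; the proofs are below) =====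
def Claim_equal_gen_prop_py : Prop := ∀ (dim : Int), Dom_gen_prop_py dim → Spec_gen_prop_py dim (gen_prop_py dim)

-- ===== LEMMAS AND PROOFS =====

-- abbreviations for the proof (used only below)
def pvF4 (t : List Char) : List String :=
  pvPropLines t (pvTp t.length) ++ pvSetterLines t (pvTp t.length)

def pvF2 (t : List Char) : List String := pvPropLines t (pvTp t.length)

def pvNB (p : List Char) (i : Int) : List (List Char) :=
  (pvProduct p i.toNat).filter (fun t => PySem.Set.len (PySem.Set.ofList t) == i)

def pvDB (p : List Char) (i : Int) : List (List Char) :=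
  (pvProduct p i.toNat).filter (fun t => !(PySem.Set.len (PySem.Set.ofList t) == i))

def pvChunkA (p : List Char) : List String :=
  (pvNodupLetters p).flatMap pvF4 ++ (pvOdupLetters p (pvNodupLetters p)).flatMap pvF2

def pvChunkEq (p : List Char) : Prop :=
  (pvBufsB p).1 ++ (pvBufsB p).2 = pvChunkA p

-- every tuple of product(s, repeat=n) has length n
lemma pv_mem_product_length (s : List Char) (n : Nat) (t : List Char)
    (h : t ∈ pvProduct s n) : t.length = n := by
  induction n generalizing t with
  | zero => simp [pvProduct] at h; simp [h]
  | succ n ih =>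
    simp [pvProduct] at h
    obtain ⟨c, -, t', ht', rfl⟩ := h
    simp [ih t' ht']

-- B's inner fold over one product list splits into the two filtered flatMaps
lemma pv_inner (i : Int) (l : List (List Char)) (b : List String × List String) :
    l.foldl (fun (bufs : List String × List String) t =>
      let tp := pvTp i.toNat
      if PySem.Set.len (PySem.Set.ofList t) == i then
        (bufs.1 ++ pvPropLines t tp ++ pvSetterLines t tp, bufs.2)
      else
        (bufs.1, bufs.2 ++ pvPropLines t tp)) b
    = (b.1 ++ (l.filter (fun t => PySem.Set.len (PySem.Set.ofList t) == i)).flatMap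
          (fun t => pvPropLines t (pvTp i.toNat) ++ pvSetterLines t (pvTp i.toNat)),
       b.2 ++ (l.filter (fun t => !(PySem.Set.len (PySem.Set.ofList t) == i))).flatMap
          (fun t => pvPropLines t (pvTp i.toNat))) := by
  induction l generalizing b with
  | nil => simp
  | cons t l ih =>
    rw [List.foldl_cons, ih]
    by_cases hc : ((PySem.Set.ofList t).length : Int) = i <;>
      simp [hc, List.append_assoc]

-- B's inner fold over product(p, i), with the type argument renamed from i to t.length
lemma pv_inner' (p : List Char) (i : Int) (b : List String × List String) :
    (pvProduct p i.toNat).foldl (fun (bufs : List String × List String) t =>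
      let tp := pvTp i.toNat
      if PySem.Set.len (PySem.Set.ofList t) == i then
        (bufs.1 ++ pvPropLines t tp ++ pvSetterLines t tp, bufs.2)
      else
        (bufs.1, bufs.2 ++ pvPropLines t tp)) b
    = (b.1 ++ (pvNB p i).flatMap pvF4, b.2 ++ (pvDB p i).flatMap pvF2) := by
  rw [pv_inner]
  unfold pvNB pvDB
  congr 1
  · congr 1
    apply List.flatMap_congr
    intro t ht
    have hl : t.length = i.toNat :=
      pv_mem_product_length p i.toNat t (List.mem_of_mem_filter ht)
    simp [pvF4, hl]
  · congr 1
    apply List.flatMap_congr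
    intro t ht
    have hl : t.length = i.toNat :=
      pv_mem_product_length p i.toNat t (List.mem_of_mem_filter ht)
    simp [pvF2, hl]

-- B's buffers in flatMap normal form
lemma pv_bufs_eq (p : List Char) :
    pvBufsB p = ((pvNB p 1 ++ pvNB p 2 ++ pvNB p 3 ++ pvNB p 4).flatMap pvF4,
                 (pvDB p 1 ++ pvDB p 2 ++ pvDB p 3 ++ pvDB p 4).flatMap pvF2) := by
  unfold pvBufsB
  rw [show PySem.List.pyRange 1 (4 + 1) 1 = [1, 2, 3, 4] from rfl]
  simp only [List.foldl_cons, List.foldl_nil]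
  rw [pv_inner' p 1, pv_inner' p 2, pv_inner' p 3, pv_inner' p 4]
  simp [List.flatMap_append, List.append_assoc]

-- A's loop body in flatMap normal form
lemma pv_bodyA_eq (b : List String) (p : List Char) :
    pvBodyA b p = b ++ pvChunkA p := by
  unfold pvBodyA pvChunkA
  simp only [List.append_assoc]
  rw [PySem.List.foldl_append_eq_flatMap
        (fun ndp => pvPropLines ndp (pvTp ndp.length) ++ pvSetterLines ndp (pvTp ndp.length)),
      PySem.List.foldl_append_eq_flatMap (fun odp => pvPropLines odp (pvTp odp.length))]
  simp only [List.append_assoc]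
  rfl

-- the per-prefix chunk equality, given the two enumeration facts (decided per prefix below)
lemma pv_chunk_of (p : List Char)
    (h1 : pvNodupLetters p = pvNB p 1 ++ pvNB p 2 ++ pvNB p 3 ++ pvNB p 4)
    (h2 : pvOdupLetters p (pvNodupLetters p) = pvDB p 1 ++ pvDB p 2 ++ pvDB p 3 ++ pvDB p 4) :
    pvChunkEq p := by
  unfold pvChunkEq pvChunkA
  rw [pv_bufs_eq, h2, h1]

-- assembling the whole function from the three per-lsets chunk equalities
lemma pv_main_of (dim : Int) (p1 p2 p3 : List Char)
    (e1 : (PySem.Str.slice "xyzw" (some 0) (some dim)).toList = p1)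
    (e2 : (PySem.Str.slice "rgba" (some 0) (some dim)).toList = p2)
    (e3 : (PySem.Str.slice "stpq" (some 0) (some dim)).toList = p3)
    (c1 : pvChunkEq p1) (c2 : pvChunkEq p2) (c3 : pvChunkEq p3) :
    gen_prop_py dim = gen_prop_py_alt dim := by
  unfold gen_prop_py gen_prop_py_alt
  unfold pvChunkEq at c1 c2 c3
  simp only [List.foldl_cons, List.foldl_nil, e1, e2, e3]
  rw [pv_bodyA_eq, pv_bodyA_eq, pv_bodyA_eq, c1, c2, c3]
  simp [pvIndent, List.append_assoc]

-- 'xyzw'[0:dim] for dim past either end of the string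
lemma pv_slice_ge (s : String) (dim : Int) (h : 4 <= dim) (hlen : s.toList.length = 4) :
    (PySem.Str.slice s (some 0) (some dim)).toList = s.toList := by
  rw [PySem.Str.toList_slice]
  show PySem.List.slice s.toList (some 0) (some dim) = s.toList
  rw [PySem.List.slice_zero_start, PySem.List.slice_to s.toList (by omega)]
  apply List.take_of_length_le
  omega

lemma pv_slice_le (s : String) (dim : Int) (h : dim <= -4) (hlen : s.toList.length = 4) :
    (PySem.Str.slice s (some 0) (some dim)).toList = [] := by
  rw [PySem.Str.toList_slice]
  show PySem.List.slice s.toList (some 0) (some dim) = []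
  have hk : dim = -((-dim).toNat : Int) := by omega
  rw [PySem.List.slice_zero_start, hk, PySem.List.slice_to_neg_natCast s.toList _ (by omega)]
  have h0 : s.toList.length - (-dim).toNat = 0 := by omega
  rw [h0, List.take_zero]

-- the thirteen prefixes 'xyzw'[0:dim] etc. can produce, each decided once
set_option maxRecDepth 100000 in
set_option maxHeartbeats 1000000 in
lemma pv_ck_nil : pvChunkEq [] := pv_chunk_of _ (by decide) (by decide)
set_option maxRecDepth 100000 in
set_option maxHeartbeats 1000000 in
lemma pv_ck_x1 : pvChunkEq ['x'] := pv_chunk_of _ (by decide) (by decide)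
set_option maxRecDepth 100000 in
set_option maxHeartbeats 1000000 in
lemma pv_ck_x2 : pvChunkEq ['x','y'] := pv_chunk_of _ (by decide) (by decide)
set_option maxRecDepth 100000 in
set_option maxHeartbeats 4000000 in
lemma pv_ck_x3 : pvChunkEq ['x','y','z'] := pv_chunk_of _ (by decide) (by decide)
set_option maxRecDepth 100000 in
set_option maxHeartbeats 8000000 in
lemma pv_ck_x4 : pvChunkEq ['x','y','z','w'] := pv_chunk_of _ (by decide) (by decide)
set_option maxRecDepth 100000 in
set_option maxHeartbeats 1000000 in
lemma pv_ck_r1 : pvChunkEq ['r'] := pv_chunk_of _ (by decide) (by decide)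
set_option maxRecDepth 100000 in
set_option maxHeartbeats 1000000 in
lemma pv_ck_r2 : pvChunkEq ['r','g'] := pv_chunk_of _ (by decide) (by decide)
set_option maxRecDepth 100000 in
set_option maxHeartbeats 4000000 in
lemma pv_ck_r3 : pvChunkEq ['r','g','b'] := pv_chunk_of _ (by decide) (by decide)
set_option maxRecDepth 100000 in
set_option maxHeartbeats 8000000 in
lemma pv_ck_r4 : pvChunkEq ['r','g','b','a'] := pv_chunk_of _ (by decide) (by decide)
set_option maxRecDepth 100000 in
set_option maxHeartbeats 1000000 in
lemma pv_ck_s1 : pvChunkEq ['s'] := pv_chunk_of _ (by decide) (by decide)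
set_option maxRecDepth 100000 in
set_option maxHeartbeats 1000000 in
lemma pv_ck_s2 : pvChunkEq ['s','t'] := pv_chunk_of _ (by decide) (by decide)
set_option maxRecDepth 100000 in
set_option maxHeartbeats 4000000 in
lemma pv_ck_s3 : pvChunkEq ['s','t','p'] := pv_chunk_of _ (by decide) (by decide)
set_option maxRecDepth 100000 in
set_option maxHeartbeats 8000000 in
lemma pv_ck_s4 : pvChunkEq ['s','t','p','q'] := pv_chunk_of _ (by decide) (by decide)

-- ===== VERDICT (by name: the statement is the Claim_ definition above) =====
set_option maxRecDepth 100000 in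
set_option maxHeartbeats 2000000 in
theorem gen_prop_py_spec : Claim_equal_gen_prop_py := by
  intro dim _
  unfold Spec_gen_prop_py
  by_cases hlo : dim <= -4
  · exact pv_main_of dim [] [] []
      (pv_slice_le _ dim hlo (by decide)) (pv_slice_le _ dim hlo (by decide))
      (pv_slice_le _ dim hlo (by decide)) pv_ck_nil pv_ck_nil pv_ck_nil
  · by_cases hhi : 4 <= dim
    · exact pv_main_of dim ['x','y','z','w'] ['r','g','b','a'] ['s','t','p','q']
        (pv_slice_ge _ dim hhi (by decide)) (pv_slice_ge _ dim hhi (by decide))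
        (pv_slice_ge _ dim hhi (by decide)) pv_ck_x4 pv_ck_r4 pv_ck_s4
    · have hl : -3 <= dim := by omega
      have hr : dim <= 3 := by omega
      interval_cases dim
      · exact pv_main_of _ ['x'] ['r'] ['s']
          (by decide) (by decide) (by decide) pv_ck_x1 pv_ck_r1 pv_ck_s1
      · exact pv_main_of _ ['x','y'] ['r','g'] ['s','t']
          (by decide) (by decide) (by decide) pv_ck_x2 pv_ck_r2 pv_ck_s2
      · exact pv_main_of _ ['x','y','z'] ['r','g','b'] ['s','t','p']
          (by decide) (by decide) (by decide) pv_ck_x3 pv_ck_r3 pv_ck_s3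
      · exact pv_main_of _ [] [] []
          (by decide) (by decide) (by decide) pv_ck_nil pv_ck_nil pv_ck_nil
      · exact pv_main_of _ ['x'] ['r'] ['s']
          (by decide) (by decide) (by decide) pv_ck_x1 pv_ck_r1 pv_ck_s1
      · exact pv_main_of _ ['x','y'] ['r','g'] ['s','t']
          (by decide) (by decide) (by decide) pv_ck_x2 pv_ck_r2 pv_ck_s2
      · exact pv_main_of _ ['x','y','z'] ['r','g','b'] ['s','t','p']
          (by decide) (by decide) (by decide) pv_ck_x3 pv_ck_r3 pv_ck_s3
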